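-- pv_equiv track=rewrite | github.com/ZaynJarvis/palette-extractor | main.py | _bands_to_cells
-- ===== SOURCE A (Python) =====
-- MIN_CELL_SIZE = 20
--
-- def _bands_to_cells(
--     bands: list[tuple[int, int]], total: int, min_size: int = MIN_CELL_SIZE,
-- ) -> list[tuple[int, int]]:
--     cells: list[tuple[int, int]] = []
--     prev = 0
--     for s, e in bands:
--         if s - prev >= min_size:
--             cells.append((prev, s))
--         prev = e + 1
--     if total - prev >= min_size:
--         cells.append((prev, total))
--     return cells
-- ===== SOURCE B (Python) =====
-- MIN_CELL_SIZE = 20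
--
-- def _bands_to_cells(bands, total, min_size=MIN_CELL_SIZE):
--     # Divide and conquer: gaps(i, j, lo, hi) = the kept gap cells of the free
--     # region bounded by lo/hi and interrupted by bands[i:j]. Split at the
--     # middle band; recursion depth O(log n).
--     def gaps(i, j, lo, hi):
--         if i == j:
--             return [(lo, hi)] if hi - lo >= min_size else []
--         k = (i + j) // 2
--         s, e = bands[k]
--         return gaps(i, k, lo, s) + gaps(k + 1, j, e + 1, hi)
--     return gaps(0, len(bands), 0, total)
-- ===== Notes on version B (the rewrite author's own statement) =====
-- stated objective: alternative
-- what changed: B is a divide-and-conquer recursion: it splits the band list at the middle band, recursively computes the gap cells of the free region left and right of that band and concatenates them, instead of A's single linear scan with a mutable prev accumulator.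
import Mathlib
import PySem

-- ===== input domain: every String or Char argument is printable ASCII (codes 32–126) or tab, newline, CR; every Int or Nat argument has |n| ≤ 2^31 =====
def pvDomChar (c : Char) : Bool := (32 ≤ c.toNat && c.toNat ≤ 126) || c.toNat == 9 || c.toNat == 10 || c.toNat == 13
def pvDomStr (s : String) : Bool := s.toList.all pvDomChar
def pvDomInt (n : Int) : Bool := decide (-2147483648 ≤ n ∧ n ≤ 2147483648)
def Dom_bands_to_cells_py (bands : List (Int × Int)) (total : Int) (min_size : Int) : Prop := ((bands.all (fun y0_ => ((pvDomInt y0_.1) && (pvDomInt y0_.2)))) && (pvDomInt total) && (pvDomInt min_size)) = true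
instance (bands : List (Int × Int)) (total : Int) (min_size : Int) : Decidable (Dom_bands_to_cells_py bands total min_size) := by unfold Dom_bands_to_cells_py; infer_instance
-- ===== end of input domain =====

-- B replaces A's linear accumulator scan by a divide-and-conquer recursion that splits the
-- band list at the middle band and concatenates the gap cells of the two halves; alternative
-- decomposition, same results.


-- ===== PORT A =====
-- literal transliteration: fold over bands carrying (cells, prev), then the final tail check
def bands_to_cells_py (bands : List (Int × Int)) (total : Int) (min_size : Int) : List (Int × Int) :=
  let st := bands.foldl
    (fun (st : List (Int × Int) × Int) (se : Int × Int) =>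
      let cells := if se.1 - st.2 ≥ min_size then st.1 ++ [(st.2, se.1)] else st.1
      (cells, se.2 + 1))
    ([], 0)
  if total - st.2 ≥ min_size then st.1 ++ [(st.2, total)] else st.1

-- ===== PORT B =====
-- literal transliteration of Source B's gaps(i, j, lo, hi): divide and conquer on the index range.
-- bands[k] is ported as getD (exact here: every reachable call has i ≤ k < j ≤ bands.length);
-- the guard is 'i < j' where Python tests 'i == j' — identical on the reachable calls (i ≤ j).
def altGaps (bands : List (Int × Int)) (min_size : Int) (i j : Nat) (lo hi : Int) : List (Int × Int) :=
  if _h : i < j then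
    let k := (i + j) / 2
    let se := bands.getD k (0, 0)
    altGaps bands min_size i k lo se.1 ++ altGaps bands min_size (k + 1) j (se.2 + 1) hi
  else
    if hi - lo ≥ min_size then [(lo, hi)] else []
termination_by j - i
decreasing_by all_goals omega

def bands_to_cells_py_alt (bands : List (Int × Int)) (total : Int) (min_size : Int) : List (Int × Int) :=
  altGaps bands min_size 0 bands.length 0 total

-- ===== PRECONDITION & SPEC =====
def Spec_bands_to_cells_py (bands : List (Int × Int)) (total : Int) (min_size : Int) (out : List (Int × Int)) : Prop := out = bands_to_cells_py_alt bands total min_size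
instance (bands : List (Int × Int)) (total : Int) (min_size : Int) (out : List (Int × Int)) : Decidable (Spec_bands_to_cells_py bands total min_size out) := by unfold Spec_bands_to_cells_py; infer_instance

-- ===== CLAIM (what is proved, stated in full; the proofs are below) =====
def Claim_equal_bands_to_cells_py : Prop := ∀ (bands : List (Int × Int)) (total : Int) (min_size : Int), Dom_bands_to_cells_py bands total min_size → Spec_bands_to_cells_py bands total min_size (bands_to_cells_py bands total min_size)

-- ===== LEMMAS AND PROOFS =====

-- linear reference function: gap cells of the free region (lo, hi) interrupted by the given bands
def lin (min_size : Int) : List (Int × Int) → Int → Int → List (Int × Int)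
  | [], lo, hi => if hi - lo ≥ min_size then [(lo, hi)] else []
  | (s, e) :: bs, lo, hi =>
      (if s - lo ≥ min_size then [(lo, s)] else []) ++ lin min_size bs (e + 1) hi

-- splitting lemma for lin at one distinguished middle band
theorem lin_split (min_size : Int) :
    ∀ (xs : List (Int × Int)) (s e : Int) (ys : List (Int × Int)) (lo hi : Int),
      lin min_size (xs ++ (s, e) :: ys) lo hi
        = lin min_size xs lo s ++ lin min_size ys (e + 1) hi := by
  intro xs
  induction xs with
  | nil => intro s e ys lo hi; simp [lin]
  | cons x xt ih =>
      intro s e ys lo hi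
      obtain ⟨xs', xe'⟩ := x
      simp [lin, ih]

-- altGaps over the index range [i, j) equals lin over the corresponding segment of bands
theorem altGaps_eq_lin (bands : List (Int × Int)) (min_size : Int) :
    ∀ (n i j : Nat), j - i = n → i ≤ j → j ≤ bands.length → ∀ (lo hi : Int),
      altGaps bands min_size i j lo hi = lin min_size ((bands.drop i).take (j - i)) lo hi := by
  intro n
  induction n using Nat.strong_induction_on with
  | _ n ih =>
    intro i j hn hij hj lo hi
    rw [altGaps]
    by_cases h : i < j
    · simp only [h, dif_pos]
      have hk1 : i ≤ (i + j) / 2 := by omega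
      have hk2 : (i + j) / 2 < j := by omega
      set k := (i + j) / 2 with hk
      have hklen : k < bands.length := by omega
      have hget : bands.getD k (0, 0) = bands[k] := by
        simp [List.getD, List.getElem?_eq_getElem hklen]
      -- segment split: drop i, take (j-i) = (take (k-i)) ++ bands[k] :: (drop (k+1), take (j-k-1))
      have hseg : (bands.drop i).take (j - i)
          = (bands.drop i).take (k - i) ++ bands[k] :: (bands.drop (k + 1)).take (j - (k + 1)) := by
        have h1 : j - i = (k - i) + (j - k) := by omega
        rw [h1, List.take_add]
        congr 1
        rw [List.drop_drop]
        have h2 : i + (k - i) = k := by omega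
        rw [h2]
        have h3 : bands.drop k = bands[k] :: bands.drop (k + 1) :=
          List.drop_eq_getElem_cons hklen
        rw [h3]
        have h4 : j - k = (j - (k + 1)) + 1 := by omega
        rw [h4]
        exact List.take_succ_cons ..
      rw [hseg, lin_split, hget]
      rw [ih (k - i) (by omega) i k rfl (by omega) (by omega),
          ih (j - (k + 1)) (by omega) (k + 1) j rfl (by omega) (by omega)]
    · have : i = j := by omega
      subst this
      simp [lin]

-- loop invariant for A: the fold from state (acc, prev) followed by the tail check
-- equals acc ++ lin min_size bands prev total
theorem a_loop_eq_lin (total min_size : Int) :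
    ∀ (bands : List (Int × Int)) (acc : List (Int × Int)) (prev : Int),
      (let st := bands.foldl
        (fun (st : List (Int × Int) × Int) (se : Int × Int) =>
          let cells := if se.1 - st.2 ≥ min_size then st.1 ++ [(st.2, se.1)] else st.1
          (cells, se.2 + 1)) (acc, prev)
       if total - st.2 ≥ min_size then st.1 ++ [(st.2, total)] else st.1)
      = acc ++ lin min_size bands prev total := by
  intro bands
  induction bands with
  | nil =>
      intro acc prev
      simp only [List.foldl, lin]
      split_ifs with h <;> simp
  | cons b bs ih =>
      intro acc prev
      obtain ⟨s, e⟩ := b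
      simp only [List.foldl_cons, lin]
      rw [ih]
      by_cases h : s - prev ≥ min_size
      · simp [h]
      · simp [h]

-- ===== VERDICT (by name: the statement is the Claim_ definition above) =====
theorem bands_to_cells_py_spec : Claim_equal_bands_to_cells_py := by
  intro bands total min_size _
  unfold Spec_bands_to_cells_py bands_to_cells_py bands_to_cells_py_alt
  rw [a_loop_eq_lin total min_size bands [] 0,
      altGaps_eq_lin bands min_size bands.length 0 bands.length (by omega) (by omega) (le_refl _)]
  simp
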